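-- pv_equiv track=rewrite | github.com/NVISO-ARES/pycobalt | pycobalt/helpers.py | csharp_quote
-- ===== SOURCE A (Python) =====
-- def csharp_quote(arg):
--     """
--     Turn a string or list of strings into C# string literals. Returns a @""
--     string literal with internal double quotes escaped. Also removes newlines.
--
--     :param arg: Argument to quote (string or list of strings)
--     :return: Quoted string or list of strings
--     """
--
--     if isinstance(arg, list) or isinstance(arg, tuple):
--         # recurse iterable
--         return [csharp_quote(child) for child in arg]
--     else:
--         new_string = str(arg)
--
--         # remove newlines
--         new_string = new_string.replace('\n', '').replace('\r', '')
--
--         # quote " characters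
--         new_string = new_string.replace('"', '""')
--
--         # enclose in @""
--         new_string = '@"{}"'.format(new_string)
--
--         return new_string
-- ===== SOURCE B (Python) =====
-- def csharp_quote(arg):
--     """Single-pass re-implementation: one traversal of the string builds the
--     escaped body (skip newlines/CRs, double the double quotes) instead of
--     three chained .replace() scans."""
--     if isinstance(arg, list) or isinstance(arg, tuple):
--         return [csharp_quote(child) for child in arg]
--     out = []
--     for ch in str(arg):
--         if ch == '\n' or ch == '\r':
--             continue
--         elif ch == '"':
--             out.append('""')
--         else:
--             out.append(ch)
--     return '@"' + ''.join(out) + '"'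
-- ===== Notes on version B (the rewrite author's own statement) =====
-- stated objective: alternative
-- what changed: Replaces the three sequential .replace() scans (remove newlines, remove carriage returns, double the quotes) with a single explicit pass over the characters that accumulates the escaped body before wrapping it as a C# verbatim literal.
import Mathlib
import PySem

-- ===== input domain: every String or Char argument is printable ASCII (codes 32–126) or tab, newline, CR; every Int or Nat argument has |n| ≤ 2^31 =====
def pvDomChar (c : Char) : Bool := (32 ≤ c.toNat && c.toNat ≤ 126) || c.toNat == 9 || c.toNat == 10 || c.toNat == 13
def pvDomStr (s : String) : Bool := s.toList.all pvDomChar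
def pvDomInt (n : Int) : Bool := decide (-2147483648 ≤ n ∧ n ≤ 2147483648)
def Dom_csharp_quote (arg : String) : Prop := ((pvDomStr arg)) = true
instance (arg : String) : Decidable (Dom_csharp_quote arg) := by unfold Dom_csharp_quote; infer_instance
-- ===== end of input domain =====

-- B replaces A's three chained .replace() scans by one accumulation pass over the characters; same output.

-- ===== PORT A =====
-- A (scalar case): remove '\n', remove '\r', double '"', wrap with the verbatim-literal prefix and quotes.
def csharp_quote (arg : String) : String :=
  let s1 := PySem.Str.replace arg "\n" ""
  let s2 := PySem.Str.replace s1 "\r" ""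
  let s3 := PySem.Str.replace s2 "\"" "\"\""
  "@\"" ++ s3 ++ "\""

-- ===== PORT B =====
-- B: one pass, appending [] / "" "" / the char itself to the accumulator, then wrap.
def csharp_quote_alt (arg : String) : String :=
  let body := arg.toList.foldl
    (fun acc c =>
      if c = '\n' ∨ c = '\r' then acc
      else if c = '"' then acc ++ ['"', '"']
      else acc ++ [c]) []
  "@\"" ++ String.ofList body ++ "\""

-- ===== PRECONDITION & SPEC =====
def Spec_csharp_quote (arg : String) (out : String) : Prop := out = csharp_quote_alt arg
instance (arg : String) (out : String) : Decidable (Spec_csharp_quote arg out) := by unfold Spec_csharp_quote; infer_instance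

-- ===== CLAIM (what is proved, stated in full; the proofs are below) =====
def Claim_equal_csharp_quote : Prop := ∀ (arg : String), Dom_csharp_quote arg → Spec_csharp_quote arg (csharp_quote arg)

-- ===== LEMMAS AND PROOFS =====

/-- The escape map B realizes per character. -/
def cqEsc (c : Char) : List Char :=
  if c = '\n' ∨ c = '\r' then []
  else if c = '"' then ['"', '"']
  else [c]

/-- `Chars.replace.go` for a single-character pattern is a flatMap, given enough fuel. -/
lemma replace_go_single (a : Char) (new : List Char) :
    ∀ (l acc : List Char) (fuel : Nat), l.length ≤ fuel →
      PySem.Chars.replace.go [a] new fuel l acc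
        = acc.reverse ++ l.flatMap (fun c => if c = a then new else [c]) := by
  intro l
  induction l with
  | nil =>
    intro acc fuel _
    cases fuel <;> simp [PySem.Chars.replace.go]
  | cons c t ih =>
    intro acc fuel hf
    cases fuel with
    | zero => simp at hf
    | succ f =>
      have ht : t.length ≤ f := by simpa using hf
      by_cases h : c = a
      · subst h
        have hpre : List.isPrefixOf [c] (c :: t) = true := by
          simp [List.isPrefixOf]
        simp only [PySem.Chars.replace.go, hpre, if_pos, List.length_cons,
          List.length_nil, List.drop_succ_cons, List.drop_zero]
        rw [ih _ _ ht]
        simp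
      · have hpre : List.isPrefixOf [a] (c :: t) = false := by
          simp [List.isPrefixOf]
          intro hac; exact h hac.symm
        simp only [PySem.Chars.replace.go, hpre]
        rw [ih _ _ ht]
        simp [h]
  termination_by l => l.length

/-- Single-character `Chars.replace` is a flatMap. -/
lemma replace_single (a : Char) (new l : List Char) :
    PySem.Chars.replace l [a] new = l.flatMap (fun c => if c = a then new else [c]) := by
  simp [PySem.Chars.replace, replace_go_single a new l [] l.length (le_refl _)]

/-- Fusing A's three single-character replaces into one flatMap of `cqEsc`. -/
lemma three_replace_eq_flatMap (l : List Char) :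
    ((l.flatMap (fun c => if c = '\n' then [] else [c])).flatMap
        (fun c => if c = '\r' then [] else [c])).flatMap
      (fun c => if c = '"' then ['"', '"'] else [c])
      = l.flatMap cqEsc := by
  induction l with
  | nil => rfl
  | cons c t ih =>
    simp only [List.flatMap_cons]
    by_cases h1 : c = '\n'
    · simp [h1, cqEsc, ih]
    · by_cases h2 : c = '\r'
      · simp [h1, h2, cqEsc, ih]
      · by_cases h3 : c = '"'
        · simp [h1, h2, h3, cqEsc, ih]
        · simp [h1, h2, h3, cqEsc, ih]

/-- B's foldl accumulates exactly the flatMap of `cqEsc`. -/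
lemma foldl_esc_eq_flatMap (l : List Char) (acc : List Char) :
    l.foldl
      (fun acc c =>
        if c = '\n' ∨ c = '\r' then acc
        else if c = '"' then acc ++ ['"', '"']
        else acc ++ [c]) acc
      = acc ++ l.flatMap cqEsc := by
  induction l generalizing acc with
  | nil => simp
  | cons c t ih =>
    simp only [List.foldl_cons, List.flatMap_cons, ih, cqEsc]
    split_ifs <;> simp

-- ===== VERDICT (by name: the statement is the Claim_ definition above) =====
theorem csharp_quote_spec : Claim_equal_csharp_quote := by
  intro arg _
  unfold Spec_csharp_quote csharp_quote csharp_quote_alt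
  apply String.toList_inj.mp
  have h1 : ("\n" : String).toList = ['\n'] := rfl
  have h2 : ("\r" : String).toList = ['\r'] := rfl
  have h3 : ("\"" : String).toList = ['"'] := rfl
  have h4 : ("\"\"" : String).toList = ['"', '"'] := rfl
  simp only [String.toList_append, PySem.Str.toList_replace, h1, h2, h3, h4,
    replace_single, foldl_esc_eq_flatMap]
  have hstr : ("" : String).toList = [] := rfl
  simp only [hstr, List.nil_append, String.toList_ofList, three_replace_eq_flatMap]
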